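-- pv_equiv track=rewrite | github.com/Matematik411/programiranje-1 | izpiti/2019-01-24/python_izpit-2019-01-24.py | pot_vrne
-- ===== SOURCE A (Python) =====
-- from functools import lru_cache
--
-- def pot_vrne(mocvara):
--     dolzina = len(mocvara)
--
--     @lru_cache(maxsize=None)
--     def zaba(polozaj, energija):
--         if polozaj >= dolzina:
--             return (0,[])
--
--         energija += mocvara[polozaj]
--
--         najkrajsi = dolzina + 1
--         potka = []
--         for skok in range(1, energija + 1):
--             poskus, do_zdaj = zaba(polozaj + skok, energija - skok)
--             if (poskus + 1) <= najkrajsi: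
--                 najkrajsi, potka = poskus + 1, [polozaj] + do_zdaj
--
--         return najkrajsi, potka
--
--     return zaba(0, 0)
-- ===== SOURCE B (Python) =====
-- def pot_vrne(mocvara):
--     # Bottom-up DP over (position, carried energy) instead of lru_cache recursion.
--     # A state whose effective energy reaches n - p can always exit in one jump of
--     # maximal length, and the ascending `<=` tie-break makes that jump the kept one,
--     # so its value is (1, [p]); only energies below that (and below the prefix sum
--     # of positive entries, the most energy the frog can carry to p) need a table row.
--     n = len(mocvara)
--     if n == 0:
--         return (0, [])
--     pref = [0] * (n + 1)
--     for i, x in enumerate(mocvara):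
--         pref[i + 1] = pref[i] + (x if x > 0 else 0)
--     rows = [None] * n  # rows[p][e] = (fewest jumps, path) from position p carrying energy e
--     for p in range(n - 1, -1, -1):
--         xp = mocvara[p]
--         row = []
--         for e in range(min(pref[p], n) + 1):
--             eff = e + xp
--             if eff >= n - p:
--                 row.append((1, [p]))
--             else:
--                 best, path = n + 1, []
--                 for skok in range(1, eff + 1):
--                     s, sp = rows[p + skok][eff - skok]
--                     if s + 1 <= best:
--                         best, path = s + 1, [p] + sp
--                 row.append((best, path))
--         rows[p] = row
--     return rows[0][0]
-- ===== Notes on version B (the rewrite author's own statement) =====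
-- stated objective: alternative
-- what changed: Replaces the lru_cache top-down recursion by an explicit bottom-up DP table rows[p][e] filled from position n-1 downward, with energies capped at min(prefix-sum of positive entries, n) and a proved closed form (1,[p]) for cells whose effective energy reaches n-p, keeping the ascending-jump loop and <= tie-break so the returned (count, path) is identical.
import Mathlib
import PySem

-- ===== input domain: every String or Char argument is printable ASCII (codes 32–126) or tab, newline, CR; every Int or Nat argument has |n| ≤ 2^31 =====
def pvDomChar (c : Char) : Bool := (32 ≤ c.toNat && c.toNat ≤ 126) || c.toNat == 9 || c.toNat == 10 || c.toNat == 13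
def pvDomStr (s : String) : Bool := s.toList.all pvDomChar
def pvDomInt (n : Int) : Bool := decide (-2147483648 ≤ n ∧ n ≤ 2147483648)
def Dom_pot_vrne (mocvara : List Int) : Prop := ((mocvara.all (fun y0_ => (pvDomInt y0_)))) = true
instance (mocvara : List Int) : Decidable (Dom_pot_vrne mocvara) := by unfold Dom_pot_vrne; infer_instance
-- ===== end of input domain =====

-- B replaces A's lru_cache top-down recursion by an explicit bottom-up DP table
-- over (position, carried energy), with the same inner loop and `<=` tie-break (objective: alternative).

-- ===== PORT A =====
-- A's memoized recursion `zaba(polozaj, energija)` (lru_cache is pure memoization,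
-- so the port is the plain recursion).  The loop `for skok in range(1, energija+1)`
-- is the fold over `i ∈ List.range energija.toNat` with `skok := i+1` (same
-- iterations in the same order), keeping the jump a Nat for the termination measure.
def pot_vrne_zaba (moc : List Int) (polozaj : Nat) (energija : Int) : Int × List Int :=
  if h : moc.length ≤ polozaj then (0, [])
  else
    let e := energija + moc.getD polozaj 0
    (List.range e.toNat).foldl
      (fun acc i =>
        let skok := i + 1
        let res := pot_vrne_zaba moc (polozaj + skok) (e - (skok : Int))
        if res.1 + 1 ≤ acc.1 then (res.1 + 1, (polozaj : Int) :: res.2) else acc)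
      ((moc.length : Int) + 1, [])
termination_by moc.length - polozaj
decreasing_by omega

def pot_vrne (mocvara : List Int) : Int × List Int :=
  pot_vrne_zaba mocvara 0 0

-- ===== PORT B =====
-- Source B's closed-off cell: exit in one jump when the effective energy reaches n-p,
-- otherwise the same ascending-skok loop with the `<=` tie-break, reading finished rows
def pot_vrne_cell (moc : List Int) (rows : List (List (Int × List Int))) (p : Nat)
    (e : Int) : Int × List Int :=
  let eff := e + moc.getD p 0
  if (moc.length : Int) - (p : Int) ≤ eff then (1, [(p : Int)])
  else
    (List.range eff.toNat).foldl
      (fun acc i =>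
        let skok := i + 1
        let pr := (rows.getD (skok - 1) []).getD (eff - (skok : Int)).toNat (0, [])
        if pr.1 + 1 ≤ acc.1 then (pr.1 + 1, (p : Int) :: pr.2) else acc)
      ((moc.length : Int) + 1, [])

-- Source B's backwards loop `for p in range(n-1, -1, -1)`: `pot_vrne_rows moc pref k`
-- is the list of finished rows for positions n-k, …, n-1 (head = row n-k);
-- row p holds energies 0 .. min(pref[p], n)
def pot_vrne_rows (moc : List Int) (pref : List Int) : Nat → List (List (Int × List Int))
  | 0 => []
  | k+1 =>
    let later := pot_vrne_rows moc pref k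
    let p := moc.length - (k+1)
    ((List.range ((min (pref.getD p 0) (moc.length : Int)).toNat + 1)).map
        (fun e : Nat => pot_vrne_cell moc later p (e : Int))) :: later

def pot_vrne_alt (mocvara : List Int) : Int × List Int :=
  if mocvara.length = 0 then (0, [])
  else
    -- Source B's pref[] loop is a prefix scan
    let pref := List.scanl (fun a x => a + (if x > 0 then x else 0)) 0 mocvara
    ((pot_vrne_rows mocvara pref mocvara.length).getD 0 []).getD 0 (0, [])

-- ===== PRECONDITION & SPEC =====
def Spec_pot_vrne (mocvara : List Int) (out : Int × List Int) : Prop := out = pot_vrne_alt mocvara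
instance (mocvara : List Int) (out : Int × List Int) : Decidable (Spec_pot_vrne mocvara out) := by unfold Spec_pot_vrne; infer_instance

-- ===== CLAIM (what is proved, stated in full; the proofs are below) =====
def Claim_equal_pot_vrne : Prop := ∀ (mocvara : List Int), Dom_pot_vrne mocvara → Spec_pot_vrne mocvara (pot_vrne mocvara)

-- ===== LEMMAS AND PROOFS =====

-- sum of the positive parts of a list (value of Source B's pref at a prefix)
def sumPos : List Int → Int
  | [] => 0
  | x :: xs => (if x > 0 then x else 0) + sumPos xs

theorem sumPos_nonneg (l : List Int) : 0 ≤ sumPos l := by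
  induction l with
  | nil => simp [sumPos]
  | cons x xs ih => simp only [sumPos]; split_ifs with h <;> omega

theorem sumPos_append (a b : List Int) : sumPos (a ++ b) = sumPos a + sumPos b := by
  induction a with
  | nil => simp [sumPos]
  | cons x xs ih => simp [sumPos, ih]; ring

theorem sumPos_take_mono (l : List Int) (p q : Nat) (h : p ≤ q) :
    sumPos (l.take p) ≤ sumPos (l.take q) := by
  have hq : q = p + (q - p) := by omega
  rw [hq, List.take_add, sumPos_append]
  have := sumPos_nonneg ((l.drop p).take (q - p))
  omega

theorem sumPos_take_succ (l : List Int) (p : Nat) (hp : p < l.length) :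
    sumPos (l.take (p+1)) = sumPos (l.take p) + (if l.getD p 0 > 0 then l.getD p 0 else 0) := by
  rw [List.take_add_one]
  have : l[p]? = some (l.getD p 0) := by
    rw [List.getD_eq_getElem?_getD, List.getElem?_eq_getElem hp]
    rfl
  rw [this]
  simp [sumPos_append, sumPos]

theorem scanl_getD (l : List Int) (b : Int) (p : Nat) (hp : p ≤ l.length) :
    (List.scanl (fun a x => a + (if x > 0 then x else 0)) b l).getD p 0 = b + sumPos (l.take p) := by
  induction l generalizing b p with
  | nil =>
    have : p = 0 := by simpa using hp
    subst this
    simp [List.scanl, sumPos]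
  | cons x xs ih =>
    cases p with
    | zero => simp [List.scanl, sumPos]
    | succ q =>
      rw [List.scanl_cons]
      simp only [List.getD_cons_succ]
      rw [ih _ q (by simpa using hp)]
      simp [sumPos]
      ring

-- every count A's recursion returns is nonnegative (fuel-indexed strong induction)
theorem zaba_fst_nonneg (fuel : Nat) (moc : List Int) (p : Nat) (e : Int)
    (hfuel : moc.length - p ≤ fuel) : 0 ≤ (pot_vrne_zaba moc p e).1 := by
  induction fuel generalizing p e with
  | zero =>
    rw [pot_vrne_zaba, dif_pos (by omega : moc.length ≤ p)]
  | succ fuel ih =>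
    rw [pot_vrne_zaba]
    split
    · simp
    · rename_i h
      have inv : ∀ (l : List Nat) (acc : Int × List Int), 0 ≤ acc.1 →
          0 ≤ (l.foldl
            (fun acc i =>
              let skok := i + 1
              let res := pot_vrne_zaba moc (p + skok) (e + moc.getD p 0 - (skok : Int))
              if res.1 + 1 ≤ acc.1 then (res.1 + 1, (p : Int) :: res.2) else acc)
            acc).1 := by
        intro l
        induction l with
        | nil => intro acc hacc; simpa using hacc
        | cons i rest ihl =>
          intro acc hacc
          simp only [List.foldl_cons]
          apply ihl
          have hres := ih (p + (i + 1)) (e + moc.getD p 0 - ((i+1 : Nat) : Int)) (by omega)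
          split <;> (try dsimp only) <;> omega
      exact inv _ _ (by dsimp only; omega)

-- a cell whose effective energy reaches n-p exits in one maximal jump, and the
-- ascending `<=` tie-break keeps exactly that jump
theorem zaba_exit (moc : List Int) (p : Nat) (e : Int) (hp : p < moc.length)
    (heff : (moc.length : Int) - (p : Int) ≤ e + moc.getD p 0) :
    pot_vrne_zaba moc p e = (1, [(p : Int)]) := by
  rw [pot_vrne_zaba, dif_neg (by omega : ¬ moc.length ≤ p)]
  simp only []
  have hpos : 1 ≤ (e + moc.getD p 0).toNat := by omega
  have hsplit : (e + moc.getD p 0).toNat = ((e + moc.getD p 0).toNat - 1) + 1 := by omega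
  rw [hsplit, List.range_succ, List.foldl_append, List.foldl_cons, List.foldl_nil]
  have hout : moc.length ≤ p + ((e + moc.getD p 0).toNat - 1 + 1) := by omega
  rw [pot_vrne_zaba, dif_pos hout]
  have inv : ∀ (l : List Nat) (acc : Int × List Int), 1 ≤ acc.1 →
      1 ≤ (l.foldl
        (fun acc i =>
          let skok := i + 1
          let res := pot_vrne_zaba moc (p + skok) (e + moc.getD p 0 - (skok : Int))
          if res.1 + 1 ≤ acc.1 then (res.1 + 1, (p : Int) :: res.2) else acc)
        acc).1 := by
    intro l
    induction l with
    | nil => intro acc hacc; simpa using hacc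
    | cons i rest ihl =>
      intro acc hacc
      simp only [List.foldl_cons]
      apply ihl
      have hres := zaba_fst_nonneg (moc.length - (p + (i+1)))
        moc (p + (i + 1)) (e + moc.getD p 0 - ((i+1 : Nat) : Int)) le_rfl
      split <;> (try dsimp only) <;> omega
  have hacc := inv (List.range ((e + moc.getD p 0).toNat - 1)) ((moc.length : Int) + 1, []) (by dsimp only; omega)
  dsimp only at hacc
  rw [if_pos (by dsimp only; omega)]
  norm_num

-- the property the finished rows for positions n-k..n-1 satisfy
def RowsOk (moc : List Int) (rows : List (List (Int × List Int))) (k : Nat) : Prop :=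
  ∀ j, j < k →
    ((rows.getD j []).length
        = (min (sumPos (moc.take (moc.length - k + j))) (moc.length : Int)).toNat + 1 ∧
     ∀ t, t < (min (sumPos (moc.take (moc.length - k + j))) (moc.length : Int)).toNat + 1 →
       (rows.getD j []).getD t (0, []) = pot_vrne_zaba moc (moc.length - k + j) (t : Int))

theorem getD_map_range {α : Type} (f : Nat → α) (d : α) (n t : Nat) (h : t < n) :
    ((List.range n).map f).getD t d = f t := by
  rw [List.getD_eq_getElem?_getD, List.getElem?_map, List.getElem?_range h]
  rfl

theorem cell_eq (moc : List Int) (later : List (List (Int × List Int))) (p : Nat)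
    (hp : p + 1 ≤ moc.length)
    (hrows : RowsOk moc later (moc.length - (p+1)))
    (e : Int) (he0 : 0 ≤ e) (he : e ≤ sumPos (moc.take p)) :
    pot_vrne_cell moc later p e = pot_vrne_zaba moc p e := by
  unfold pot_vrne_cell
  by_cases hcl : (moc.length : Int) - (p : Int) ≤ e + moc.getD p 0
  · rw [if_pos hcl, zaba_exit moc p e (by omega) hcl]
  · rw [if_neg hcl]
    conv_rhs => rw [pot_vrne_zaba]
    rw [dif_neg (by omega : ¬ moc.length ≤ p)]
    apply PySem.List.foldl_congr_mem
    intro acc i hi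
    rw [List.mem_range] at hi
    simp only [Nat.add_sub_cancel]
    have hin : p + (i + 1) < moc.length := by omega
    have hj : i < moc.length - (p + 1) := by omega
    obtain ⟨hlen, hval⟩ := hrows i hj
    have hpos : moc.length - (moc.length - (p + 1)) + i = p + 1 + i := by omega
    rw [hpos] at hlen hval
    -- the energy passed on is nonnegative and within row p+1+i
    have heffpos : 0 ≤ e + moc.getD p 0 - ((i+1 : Nat) : Int) := by omega
    have hmax : moc.getD p 0 ≤ (if moc.getD p 0 > 0 then moc.getD p 0 else 0) := by
      split_ifs <;> omega
    have h1 := sumPos_take_succ moc p (by omega)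
    have h2 := sumPos_take_mono moc (p + 1) (p + 1 + i) (by omega)
    have hidx : (e + moc.getD p 0 - ((i+1 : Nat) : Int)).toNat
        < (min (sumPos (moc.take (p + 1 + i))) (moc.length : Int)).toNat + 1 := by omega
    have hget := hval _ hidx
    have hcast : (((e + moc.getD p 0 - ((i+1 : Nat) : Int)).toNat : Nat) : Int)
        = e + moc.getD p 0 - ((i+1 : Nat) : Int) := Int.toNat_of_nonneg heffpos
    rw [hget, hcast]
    have harg : p + 1 + i = p + (i + 1) := by omega
    rw [harg]

theorem rows_spec (moc : List Int) (k : Nat) (hk : k ≤ moc.length) :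
    RowsOk moc (pot_vrne_rows moc (List.scanl (fun a x => a + (if x > 0 then x else 0)) 0 moc) k) k := by
  induction k with
  | zero => intro j hj; omega
  | succ k ih =>
    have IH := ih (by omega)
    intro j hj
    rw [pot_vrne_rows]
    cases j with
    | succ j' =>
      simp only [List.getD_cons_succ]
      have hpos : moc.length - (k + 1) + (j' + 1) = moc.length - k + j' := by omega
      rw [hpos]
      exact IH j' (by omega)
    | zero =>
      simp only [List.getD_cons_zero, Nat.add_zero]
      have hple : moc.length - (k + 1) ≤ moc.length := by omega
      have hpref : (List.scanl (fun a x => a + (if x > 0 then x else 0)) 0 moc).getD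
          (moc.length - (k + 1)) 0 = sumPos (moc.take (moc.length - (k + 1))) := by
        rw [scanl_getD moc 0 _ hple]; ring
      rw [hpref]
      constructor
      · simp
      · intro t ht
        rw [getD_map_range _ _ _ t ht]
        apply cell_eq
        · omega
        · have : moc.length - (moc.length - (k + 1) + 1) = k := by omega
          rw [this]; exact IH
        · exact Int.natCast_nonneg t
        · have hnn := sumPos_nonneg (moc.take (moc.length - (k + 1)))
          omega

-- ===== VERDICT (by name: the statement is the Claim_ definition above) =====
theorem pot_vrne_spec : Claim_equal_pot_vrne := by
  intro moc _
  unfold Spec_pot_vrne pot_vrne pot_vrne_alt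
  by_cases h0 : moc.length = 0
  · rw [pot_vrne_zaba]
    simp [h0]
  · have hn : 0 < moc.length := Nat.pos_of_ne_zero h0
    have hr := rows_spec moc moc.length le_rfl
    have h00 := (hr 0 hn).2 0 (by
      have := sumPos_nonneg (moc.take (moc.length - moc.length + 0)); omega)
    simp only [Nat.sub_self, Nat.add_zero] at h00
    simp only [if_neg h0]
    rw [h00]
    simp
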